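-- pv_equiv track=rewrite | github.com/DarkStarStrix/Nexa_Compute | scripts/generate_forge_mdx.py | clean_headings
-- ===== SOURCE A (Python) =====
-- def clean_headings(content):
--     # Ensure a single H1 at top, then H2 for sections
--     lines = content.split('\n')
--     cleaned = []
--     h1_seen = False
--     for line in lines:
--         if line.startswith('# '):
--             if not h1_seen:
--                 cleaned.append(line)
--                 h1_seen = True
--             else:
--                 # downgrade extra H1 to H2
--                 cleaned.append('#' + line)
--         else:
--             cleaned.append(line)
--     return '\n'.join(cleaned)
-- ===== SOURCE B (Python) =====
-- def clean_headings(content):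
--     # Locate the first H1, keep everything up to and including it,
--     # then demote every later H1 to H2.
--     lines = content.split('\n')
--     k = next((i for i, l in enumerate(lines) if l.startswith('# ')), len(lines))
--     head = lines[:k + 1]
--     tail = ['#' + l if l.startswith('# ') else l for l in lines[k + 1:]]
--     return '\n'.join(head + tail)
-- ===== Notes on version B (the rewrite author's own statement) =====
-- stated objective: alternative
-- what changed: Replaces the stateful h1_seen flag loop with a locate-the-first-H1 boundary search, emitting the head slice unchanged and demoting every H1 in the tail slice.
import Mathlib
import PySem

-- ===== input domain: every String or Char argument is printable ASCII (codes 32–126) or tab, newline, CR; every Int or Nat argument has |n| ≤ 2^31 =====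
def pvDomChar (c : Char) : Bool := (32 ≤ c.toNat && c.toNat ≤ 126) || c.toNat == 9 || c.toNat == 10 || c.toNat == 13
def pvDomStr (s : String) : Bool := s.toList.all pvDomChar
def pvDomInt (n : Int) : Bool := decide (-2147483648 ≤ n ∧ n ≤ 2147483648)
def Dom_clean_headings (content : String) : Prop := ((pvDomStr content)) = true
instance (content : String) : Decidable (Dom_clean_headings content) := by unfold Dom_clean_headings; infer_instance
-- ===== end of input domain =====

-- B replaces A's stateful h1_seen flag loop by a locate-first-H1 boundary search
-- (head emitted unchanged, every H1 in the tail demoted); alternative decomposition, same cost.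

-- ===== PORT A =====
-- A's loop: one pass with the h1_seen flag, appending to cleaned.
def cleanLoopA : List String → Bool → List String
  | [], _ => []
  | l :: ls, seen =>
    if PySem.Str.startswith l "# " then
      if !seen then l :: cleanLoopA ls true
      else ("#" ++ l) :: cleanLoopA ls true
    else l :: cleanLoopA ls seen

def clean_headings (content : String) : String :=
  match PySem.Str.split? content "\n" with
  | none => ""   -- unreachable: separator "\n" is nonempty
  | some lines => PySem.Str.join "\n" (cleanLoopA lines false)

-- ===== PORT B =====
def demoteB (l : String) : String :=
  if PySem.Str.startswith l "# " then "#" ++ l else l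

def clean_headings_alt (content : String) : String :=
  match PySem.Str.split? content "\n" with
  | none => ""   -- unreachable: separator "\n" is nonempty
  | some lines =>
    let k := lines.findIdx (fun l => PySem.Str.startswith l "# ")
    PySem.Str.join "\n" (lines.take (k + 1) ++ (lines.drop (k + 1)).map demoteB)

-- ===== PRECONDITION & SPEC =====
def Spec_clean_headings (content : String) (out : String) : Prop := out = clean_headings_alt content
instance (content : String) (out : String) : Decidable (Spec_clean_headings content out) := by unfold Spec_clean_headings; infer_instance

-- ===== CLAIM (what is proved, stated in full; the proofs are below) =====
def Claim_equal_clean_headings : Prop := ∀ (content : String), Dom_clean_headings content → Spec_clean_headings content (clean_headings content)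

-- ===== LEMMAS AND PROOFS =====

-- Once the flag is set, A's loop just demotes every H1.
theorem cleanLoopA_true (ls : List String) : cleanLoopA ls true = ls.map demoteB := by
  induction ls with
  | nil => rfl
  | cons l ls ih =>
    by_cases h : PySem.Chars.startswith l.toList ['#', ' '] = true <;>
      simp [cleanLoopA, demoteB, h, ih]

theorem cleanLoopA_false (ls : List String) :
    cleanLoopA ls false =
      ls.take (ls.findIdx (fun l => PySem.Str.startswith l "# ") + 1) ++
        (ls.drop (ls.findIdx (fun l => PySem.Str.startswith l "# ") + 1)).map demoteB := by
  induction ls with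
  | nil => rfl
  | cons l ls ih =>
    by_cases h : PySem.Chars.startswith l.toList ['#', ' '] = true
    · simp [cleanLoopA, h, List.findIdx_cons, cleanLoopA_true]
    · simp [cleanLoopA, h, List.findIdx_cons, ih]

-- ===== VERDICT (by name: the statement is the Claim_ definition above) =====
theorem clean_headings_spec : Claim_equal_clean_headings := by
  intro content _
  unfold Spec_clean_headings clean_headings clean_headings_alt
  cases PySem.Str.split? content "\n" with
  | none => rfl
  | some lines => simp [cleanLoopA_false]
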